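-- pv_equiv track=rewrite | github.com/kseniia-strelbytska/discrete-diffusion | anbn.py | does_satisfy_rule2
-- ===== SOURCE A (Python) =====
-- def does_satisfy_rule2(seq): # seq has no batch dim, no SOS token
--     zero, one = False, False
--     for idx in range(0, len(seq)):
--         if seq[idx] != 0 and seq[idx] != 1: # one of EOS/SOS/PAD/MASK tokens
--             continue
--
--         if seq[idx] == 0:
--             zero = True
--
--             if one == True:
--                 return False
--         else:
--             one = True
--     return True
-- ===== SOURCE B (Python) =====
-- def does_satisfy_rule2(seq):
--     toks = [x for x in seq if x == 0 or x == 1]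
--     return toks == sorted(toks)
-- ===== Notes on version B (the rewrite author's own statement) =====
-- stated objective: simpler
-- what changed: Replaces the stateful flag-tracking scan with building the filtered 0/1 subsequence and checking it equals its sorted version (no 0 after a 1 iff the filtered list is non-decreasing).
import Mathlib
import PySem

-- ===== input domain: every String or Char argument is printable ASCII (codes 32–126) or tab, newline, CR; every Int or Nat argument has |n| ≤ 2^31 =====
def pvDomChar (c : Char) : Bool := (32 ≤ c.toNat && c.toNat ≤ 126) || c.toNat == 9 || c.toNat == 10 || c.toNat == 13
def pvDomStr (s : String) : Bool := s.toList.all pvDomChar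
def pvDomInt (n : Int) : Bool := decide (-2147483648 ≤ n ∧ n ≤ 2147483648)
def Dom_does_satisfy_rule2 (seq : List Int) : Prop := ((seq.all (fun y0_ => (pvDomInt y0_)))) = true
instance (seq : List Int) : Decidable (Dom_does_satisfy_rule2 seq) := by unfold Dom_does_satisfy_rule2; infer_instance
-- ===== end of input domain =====

-- B replaces A's flag-tracking scan by filtering the 0/1 tokens and comparing with the sorted list (simpler; return value equivalence).


-- ===== PORT A =====
-- loop over the sequence with the two flags of A (zero, one); early `return False` = result false
def pvLoopA : List Int → Bool → Bool → Bool
  | [], _, _ => true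
  | x :: xs, zero, one =>
    if x ≠ 0 ∧ x ≠ 1 then pvLoopA xs zero one
    else if x = 0 then
      (if one = true then false else pvLoopA xs true one)
    else pvLoopA xs zero true

def does_satisfy_rule2 (seq : List Int) : Bool := pvLoopA seq false false

-- ===== PORT B =====
def does_satisfy_rule2_alt (seq : List Int) : Bool :=
  let toks := seq.filter (fun x => x == 0 || x == 1)
  toks == PySem.List.sorted toks (fun x => x) false

-- ===== PRECONDITION & SPEC =====
def Spec_does_satisfy_rule2 (seq : List Int) (out : Bool) : Prop := out = does_satisfy_rule2_alt seq
instance (seq : List Int) (out : Bool) : Decidable (Spec_does_satisfy_rule2 seq out) := by unfold Spec_does_satisfy_rule2; infer_instance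

-- ===== CLAIM (what is proved, stated in full; the proofs are below) =====
def Claim_equal_does_satisfy_rule2 : Prop := ∀ (seq : List Int), Dom_does_satisfy_rule2 seq → Spec_does_satisfy_rule2 seq (does_satisfy_rule2 seq)

-- ===== LEMMAS AND PROOFS =====

-- ===== VERDICT (by name: the statement is the Claim_ definition above) =====
-- elements of the filtered list are 0 or 1
theorem pv_mem_filter01 {xs : List Int} {y : Int}
    (h : y ∈ xs.filter (fun x => x == 0 || x == 1)) : y = 0 ∨ y = 1 := by
  simp [List.mem_filter] at h
  rcases h with ⟨-, h⟩
  omega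

-- with the `one` flag set, the loop returns true iff no 0 remains among the 0/1 tokens
theorem pvLoopA_one (xs : List Int) (zero : Bool) :
    pvLoopA xs zero true = decide ((0 : Int) ∉ xs.filter (fun x => x == 0 || x == 1)) := by
  induction xs generalizing zero with
  | nil => simp [pvLoopA]
  | cons x xs ih =>
    by_cases h0 : x = 0
    · subst h0; simp [pvLoopA]
    · by_cases h1 : x = 1
      · subst h1; simp [pvLoopA, ih]
      · simp [pvLoopA, h0, h1, ih]

-- with the `one` flag clear, the loop returns true iff the 0/1 tokens are non-decreasing
theorem pvLoopA_zero (xs : List Int) (zero : Bool) :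
    pvLoopA xs zero false
      = decide ((xs.filter (fun x => x == 0 || x == 1)).Pairwise (· ≤ ·)) := by
  induction xs generalizing zero with
  | nil => simp [pvLoopA]
  | cons x xs ih =>
    by_cases h0 : x = 0
    · subst h0
      simp only [pvLoopA, ih]
      simp only [List.filter_cons]
      have hle : ∀ y ∈ xs.filter (fun x => x == 0 || x == 1), (0 : Int) ≤ y := by
        intro y hy
        rcases pv_mem_filter01 hy with h | h <;> omega
      simp [List.pairwise_cons]
      intro _ a' _ ha'
      omega
    · by_cases h1 : x = 1
      · subst h1
        simp only [pvLoopA, pvLoopA_one]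
        simp only [List.filter_cons]
        by_cases hz : (0 : Int) ∈ xs.filter (fun x => x == 0 || x == 1)
        · have : ¬ ((1 : Int) :: xs.filter (fun x => x == 0 || x == 1)).Pairwise (· ≤ ·) := by
            intro hp
            rcases List.pairwise_cons.mp hp with ⟨hall, -⟩
            have := hall 0 hz
            omega
          simp [hz, this]
        · have hall : ∀ y ∈ xs.filter (fun x => x == 0 || x == 1), (1 : Int) ≤ y := by
            intro y hy
            rcases pv_mem_filter01 hy with h | h
            · exact absurd (h ▸ hy) hz
            · omega
          have hp : (xs.filter (fun x => x == 0 || x == 1)).Pairwise (· ≤ ·) := by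
            apply List.Pairwise.imp_of_mem (R := fun a b => a = 1 ∧ b = 1) (by intro a b _ _ h; omega)
            apply List.pairwise_of_forall_mem_list
            intro a ha b hb
            constructor
            · rcases pv_mem_filter01 ha with h | h
              · exact absurd (h ▸ ha) hz
              · exact h
            · rcases pv_mem_filter01 hb with h | h
              · exact absurd (h ▸ hb) hz
              · exact h
          simp [hz, List.pairwise_cons, hp]
          intro a' ha' h
          rcases h with h | h
          · exact absurd (List.mem_filter.mpr ⟨ha', by simp [h]⟩) (h ▸ hz)
          · omega
      · simp [pvLoopA, h0, h1, ih]

-- a list equals its (identity-key) Python sort iff it is non-decreasing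
theorem pv_eq_sorted_iff (l : List Int) :
    (l = PySem.List.sorted l (fun x => x) false) ↔ l.Pairwise (· ≤ ·) := by
  constructor
  · intro h
    have := PySem.List.sorted_pairwise (xs := l) (key := fun x : Int => x)
    rw [← h] at this
    exact this
  · intro h
    exact (PySem.List.sorted_eq_self_of_pairwise _ _ h).symm

-- ===== VERDICT =====
theorem does_satisfy_rule2_spec : Claim_equal_does_satisfy_rule2 := by
  intro seq _
  unfold Spec_does_satisfy_rule2 does_satisfy_rule2 does_satisfy_rule2_alt
  rw [pvLoopA_zero]
  have h := pv_eq_sorted_iff (seq.filter (fun x => x == 0 || x == 1))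
  by_cases hp : (seq.filter (fun x => x == 0 || x == 1)).Pairwise (· ≤ ·)
  · simp [hp, ← h.mpr hp]
  · have hne : ¬ (seq.filter (fun x => x == 0 || x == 1)
        = PySem.List.sorted (seq.filter (fun x => x == 0 || x == 1)) (fun x => x) false) :=
      fun heq => hp (h.mp heq)
    simp [hp, hne]
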